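-- pv_equiv track=rewrite | github.com/LilithsDemon/Simple-Caeser | main.py | advanced_shift
-- ===== SOURCE A (Python) =====
-- def split(word):
--     return [char for char in word]
--
-- def join(wordList):
--     word = ""
--     for char in range (len(wordList)):
--         word += wordList[char]
--     return word
--
-- def advanced_shift(shiftText, shiftNum):
--     encyptedText = ""
--     char = 0
--     while char != (len(shiftText)):
--         if (char % 5) == 0 and (char != 0):
--             #split the text, add a space, rejoin the text
--             textArray = split(shiftText)
--             textArray.insert(char, " ")
--             shiftText = join(textArray)
--
--         if (ord(shiftText[char]) >= 65 and ord(shiftText[char]) <= 90):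
--             letterValue = ord(shiftText[char])
--             letterValue -= 64 #This gets A to 1 this means we can tell which value this should be
--             newValue = letterValue + shiftNum
--
--             div = newValue//26 #used to see if the letter should be a negative or positive
--             newValue = newValue%26 #used to find what the letter should be
--
--             if newValue == 0:
--                 newValue += 90
--             elif div%2 == 0: #if it is even it needs to be a cap
--                 newValue += 64
--             else: #if odd it needs to be a lowercase
--                 newValue += 96
--
--             encyptedText += chr(newValue)
--
--         elif (ord(shiftText[char]) >= 97 and ord(shiftText[char]) <= 122):
--             letterValue = ord(shiftText[char])
--             letterValue -= 96  # This gets A to 1 this means we can tell which value this should be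
--             newValue = letterValue + shiftNum
--
--             div = newValue//26 #used to see if the letter should be a negative or positive
--             newValue = newValue%26 #used to find what the letter should be
--
--             if newValue == 0:
--                 newValue += 122
--             elif div%2 == 1: #if it is odd it needs to be a cap
--                 newValue += 64
--             else: #if even it has to be a lower case
--                 newValue += 96
--
--             encyptedText += chr(newValue)
--
--         elif (ord(shiftText[char]) == 32): #If there is a space add a space
--             encyptedText += " "
--
--         #This will remove any punctuation as there will be no punctuation added to encyrptedText
--
--         char += 1
--
--     return encyptedText
-- ===== SOURCE B (Python) =====
-- def _cipher(c, shiftNum):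
--     # mod-52 form of the wrap/case-flip cipher: r = (value + shift) mod 52,
--     # r in 1..25 keeps the source-side case block, 0/26 maps to the source-case 'Z'/'z',
--     # 27..51 is the flipped-case block.
--     o = ord(c)
--     if 65 <= o <= 90:
--         r = (o - 64 + shiftNum) % 52
--         if r % 26 == 0:
--             return "Z"
--         elif r < 26:
--             return chr(64 + r)
--         else:
--             return chr(70 + r)
--     elif 97 <= o <= 122:
--         r = (o - 96 + shiftNum) % 52
--         if r % 26 == 0:
--             return "z"
--         elif r < 26:
--             return chr(96 + r)
--         else:
--             return chr(38 + r)
--     elif o == 32: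
--         return " "
--     return ""
--
-- def advanced_shift(shiftText, shiftNum):
--     # pass 1: insert a space before every position that is a nonzero multiple of 5
--     spaced = []
--     pos = 0
--     for c in shiftText:
--         if pos % 5 == 0 and pos != 0:
--             spaced.append(" ")
--             pos += 1
--         spaced.append(c)
--         pos += 1
--     # pass 2: encipher
--     out = []
--     for c in spaced:
--         out.append(_cipher(c, shiftNum))
--     return "".join(out)
-- ===== Notes on version B (the rewrite author's own statement) =====
-- stated objective: faster
-- what changed: Replaced A's single while-loop that repeatedly splits the string into a list, inserts a space and rejoins it (rescanning the whole string every 5 characters) by two linear passes: one pass builds the spaced character sequence with a position counter, a second enciphers each character using a single mod-52 residue instead of A's floordiv/mod-26 parity arithmetic.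
import Mathlib
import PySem

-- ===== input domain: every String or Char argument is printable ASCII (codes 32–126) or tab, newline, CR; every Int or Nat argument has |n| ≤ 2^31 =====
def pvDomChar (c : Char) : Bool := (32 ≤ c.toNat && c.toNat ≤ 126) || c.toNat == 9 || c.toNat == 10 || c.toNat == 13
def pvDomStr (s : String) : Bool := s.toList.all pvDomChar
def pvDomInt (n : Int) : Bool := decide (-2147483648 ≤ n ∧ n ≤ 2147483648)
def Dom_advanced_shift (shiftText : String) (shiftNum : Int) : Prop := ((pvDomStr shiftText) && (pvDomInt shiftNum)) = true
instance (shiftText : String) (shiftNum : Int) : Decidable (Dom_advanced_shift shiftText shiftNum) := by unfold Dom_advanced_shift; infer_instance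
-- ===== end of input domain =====

-- B replaces A's quadratic mutate-insert/split/join loop by two linear passes (space insertion, then a
-- mod-52 form of the case-flipping cipher); equivalence of the return values is proved below.

-- ===== PORT A =====
-- split(word) = [char for char in word]
def pySplit (word : List Char) : List Char := word.map (fun c => c)

-- join(wordList): word = ""; for char in range(len(wordList)): word += wordList[char]
-- (the index is always in range, so pyGetD with a dummy default is exact here)
def pyJoin (wordList : List Char) : List Char :=
  (PySem.List.pyRange 0 (wordList.length : Int) 1).foldl
    (fun word ch => word ++ [PySem.List.pyGetD wordList ch ' ']) []

-- the body of A's if/elif chain updating encyptedText for the character at shiftText[char]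
def aStep (encyptedText : List Char) (c : Char) (shiftNum : Int) : List Char :=
  if 65 ≤ (c.toNat : Int) ∧ (c.toNat : Int) ≤ 90 then
    let letterValue : Int := (c.toNat : Int) - 64
    let newValue := letterValue + shiftNum
    let div := PySem.Int.floordiv newValue 26
    let newValue := PySem.Int.mod newValue 26
    let newValue :=
      if newValue = 0 then newValue + 90
      else if PySem.Int.mod div 2 = 0 then newValue + 64
      else newValue + 96
    encyptedText ++ [Char.ofNat newValue.toNat]   -- chr: value provably in 65..122
  else if 97 ≤ (c.toNat : Int) ∧ (c.toNat : Int) ≤ 122 then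
    let letterValue : Int := (c.toNat : Int) - 96
    let newValue := letterValue + shiftNum
    let div := PySem.Int.floordiv newValue 26
    let newValue := PySem.Int.mod newValue 26
    let newValue :=
      if newValue = 0 then newValue + 122
      else if PySem.Int.mod div 2 = 1 then newValue + 64
      else newValue + 96
    encyptedText ++ [Char.ofNat newValue.toNat]
  else if (c.toNat : Int) = 32 then encyptedText ++ [' ']
  else encyptedText

-- the while loop; fuel (2*len+1 at the call site) only makes it total, it never runs out
def aLoop (shiftNum : Int) : Nat → List Char → Int → List Char → List Char
  | 0, _, _, acc => acc
  | fuel+1, text, char, acc =>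
    if char = (text.length : Int) then acc
    else
      let text :=
        if PySem.Int.mod char 5 = 0 ∧ char ≠ 0 then
          pyJoin (PySem.List.insert (pySplit text) char ' ')
        else text
      match PySem.List.pyGet? text char with
      | none => acc        -- IndexError; unreachable: 0 ≤ char < len(text) throughout
      | some c => aLoop shiftNum fuel text (char + 1) (aStep acc c shiftNum)

def advanced_shift (shiftText : String) (shiftNum : Int) : String :=
  String.mk (aLoop shiftNum (2 * shiftText.toList.length + 1) shiftText.toList 0 [])

-- ===== PORT B =====
-- pass 1: insert a space before every position that is a nonzero multiple of 5
def spacedB : List Char → Int → List Char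
  | [], _ => []
  | c :: rest, pos =>
    if PySem.Int.mod pos 5 = 0 ∧ pos ≠ 0 then ' ' :: c :: spacedB rest (pos + 2)
    else c :: spacedB rest (pos + 1)

-- _cipher: mod-52 form of the wrap/case-flip cipher
def cipherB (c : Char) (shiftNum : Int) : List Char :=
  if 65 ≤ (c.toNat : Int) ∧ (c.toNat : Int) ≤ 90 then
    let r := PySem.Int.mod ((c.toNat : Int) - 64 + shiftNum) 52
    if PySem.Int.mod r 26 = 0 then ['Z']
    else if r < 26 then [Char.ofNat (64 + r).toNat]
    else [Char.ofNat (70 + r).toNat]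
  else if 97 ≤ (c.toNat : Int) ∧ (c.toNat : Int) ≤ 122 then
    let r := PySem.Int.mod ((c.toNat : Int) - 96 + shiftNum) 52
    if PySem.Int.mod r 26 = 0 then ['z']
    else if r < 26 then [Char.ofNat (96 + r).toNat]
    else [Char.ofNat (38 + r).toNat]
  else if (c.toNat : Int) = 32 then [' ']
  else []

def advanced_shift_alt (shiftText : String) (shiftNum : Int) : String :=
  String.mk ((spacedB shiftText.toList 0).foldl (fun acc c => acc ++ cipherB c shiftNum) [])

-- ===== PRECONDITION & SPEC =====
def Spec_advanced_shift (shiftText : String) (shiftNum : Int) (out : String) : Prop := out = advanced_shift_alt shiftText shiftNum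
instance (shiftText : String) (shiftNum : Int) (out : String) : Decidable (Spec_advanced_shift shiftText shiftNum out) := by unfold Spec_advanced_shift; infer_instance

-- ===== CLAIM (what is proved, stated in full; the proofs are below) =====
def Claim_equal_advanced_shift : Prop := ∀ (shiftText : String) (shiftNum : Int), Dom_advanced_shift shiftText shiftNum → Spec_advanced_shift shiftText shiftNum (advanced_shift shiftText shiftNum)

-- ===== LEMMAS AND PROOFS =====

lemma pySplit_eq (l : List Char) : pySplit l = l := by simp [pySplit]

lemma pyJoin_eq (l : List Char) : pyJoin l = l := by
  unfold pyJoin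
  rw [PySem.List.foldl_pyRange_zero_pyGetD' l ' ' (fun w c => w ++ [c]) []]
  simpa using PySem.List.foldl_append_singleton_eq_self l ([]:List Char)

lemma aStep_eq (acc : List Char) (c : Char) (n : Int) :
    aStep acc c n = acc ++ cipherB c n := by
  unfold aStep cipherB
  have h26 : ∀ a : Int, PySem.Int.mod a 26 = a % 26 :=
    fun a => PySem.Int.mod_eq_emod_of_pos (a:=a) (b:=26) (by norm_num)
  have h52 : ∀ a : Int, PySem.Int.mod a 52 = a % 52 :=
    fun a => PySem.Int.mod_eq_emod_of_pos (a:=a) (b:=52) (by norm_num)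
  have h2 : ∀ a : Int, PySem.Int.mod a 2 = a % 2 :=
    fun a => PySem.Int.mod_eq_emod_of_pos (a:=a) (b:=2) (by norm_num)
  have hdiv : ∀ a : Int, PySem.Int.floordiv a 26 = a / 26 :=
    fun a => PySem.Int.floordiv_eq_ediv_of_pos (a:=a) (b:=26) (by norm_num)
  simp only [h26, h52, h2, hdiv]
  split_ifs <;>
    first
      | rfl
      | (rw [List.append_nil])
      | (exfalso; omega)
      | (refine congrArg (fun l => acc ++ l) (congrArg (fun x => [x]) ?_)
         first
           | (exact congrArg Char.ofNat (by omega))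
           | (rw [show ('Z':Char) = Char.ofNat 90 from by decide]
              exact congrArg Char.ofNat (by omega))
           | (rw [show ('z':Char) = Char.ofNat 122 from by decide]
              exact congrArg Char.ofNat (by omega)))

lemma cipherB_space (n : Int) : cipherB ' ' n = [' '] := by
  simp [cipherB]

lemma mod5_eq (a : Int) : PySem.Int.mod a 5 = a % 5 :=
  PySem.Int.mod_eq_emod_of_pos (a:=a) (b:=5) (by norm_num)

lemma aLoop_eq (n : Int) (rest : List Char) : ∀ (done acc : List Char) (fuel : Nat),
    2 * rest.length + 1 ≤ fuel →
    aLoop n fuel (done ++ rest) (done.length : Int) acc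
      = acc ++ (spacedB rest (done.length : Int)).flatMap (fun c => cipherB c n) := by
  induction rest with
  | nil =>
    intro done acc fuel hf
    obtain ⟨f, rfl⟩ : ∃ f, fuel = f + 1 := ⟨fuel - 1, by omega⟩
    simp [aLoop, spacedB]
  | cons c rest ih =>
    intro done acc fuel hf
    obtain ⟨f, rfl⟩ : ∃ f, fuel = f + 1 := ⟨fuel - 1, by omega⟩
    simp only [aLoop]
    rw [if_neg (by simp; omega)]
    by_cases h5 : PySem.Int.mod (done.length : Int) 5 = 0 ∧ (done.length : Int) ≠ 0
    · rw [if_pos h5, pySplit_eq,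
        PySem.List.insert_natCast (done ++ c :: rest) done.length ' ' (by simp),
        List.take_left, List.drop_left, pyJoin_eq,
        PySem.List.pyGet?_append_length]
      simp only []
      rw [aStep_eq, cipherB_space]
      -- second iteration: processes c, no insertion at position len+1
      obtain ⟨f', rfl⟩ : ∃ f', f = f' + 1 := ⟨f - 1, by simp at hf; omega⟩
      simp only [aLoop]
      rw [if_neg (by simp; omega)]
      rw [if_neg (by
        rw [mod5_eq] at *
        intro hcon
        exact absurd hcon.1 (by omega))]
      rw [show done ++ ' ' :: c :: rest = (done ++ [' ']) ++ c :: rest from by simp,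
        show ((done.length : Int) + 1) = (((done ++ [' ']).length : Nat) : Int) from by simp,
        PySem.List.pyGet?_append_length]
      simp only []
      rw [aStep_eq]
      have hIH := ih (done ++ [' ', c]) ((acc ++ [' ']) ++ cipherB c n) f' (by simp at hf ⊢; omega)
      rw [show (done ++ [' ', c] : List Char) = (done ++ [' ']) ++ [c] from by simp] at hIH
      rw [show (((done ++ [' ']) ++ [c]) ++ rest : List Char) = (done ++ [' ']) ++ c :: rest from by simp] at hIH
      rw [show ((((done ++ [' ']) ++ [c]).length : Nat) : Int) = ((((done ++ [' ']).length : Nat) : Int) + 1) from by simp; try omega] at hIH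
      rw [hIH]
      rw [show spacedB (c :: rest) (done.length : Int) = ' ' :: c :: spacedB rest ((done.length : Int) + 2) from by rw [spacedB, if_pos h5]]
      simp only [List.flatMap_cons, cipherB_space]
      rw [show ((((done ++ [' ']).length : Nat) : Int) + 1) = ((done.length : Int) + 2) from by simp; try omega]
      simp [List.append_assoc]
    · rw [if_neg h5, PySem.List.pyGet?_append_length]
      simp only []
      rw [aStep_eq]
      have hIH := ih (done ++ [c]) (acc ++ cipherB c n) f (by simp at hf ⊢; omega)
      rw [show ((done ++ [c]) ++ rest : List Char) = done ++ c :: rest from by simp] at hIH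
      rw [show (((done ++ [c]).length : Nat) : Int) = ((done.length : Int) + 1) from by simp; try omega] at hIH
      rw [hIH]
      rw [show spacedB (c :: rest) (done.length : Int) = c :: spacedB rest ((done.length : Int) + 1) from by rw [spacedB, if_neg h5]]
      simp [List.append_assoc]

-- ===== VERDICT (by name: the statement is the Claim_ definition above) =====
theorem advanced_shift_spec : Claim_equal_advanced_shift := by
  intro s n _
  unfold Spec_advanced_shift advanced_shift advanced_shift_alt
  have h := aLoop_eq n s.toList [] [] (2 * s.toList.length + 1) (by omega)
  simp only [List.nil_append, List.length_nil, Nat.cast_zero] at h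
  rw [h, PySem.List.foldl_append_eq_flatMap]
  simp
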